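-- pv_equiv track=rewrite | github.com/TanyaAng/Python_Advanced | 22_Exam_Preparation/03_naughty_or_nice.py | found_is_unique_by_name
-- ===== SOURCE A (Python) =====
-- def found_is_unique_by_name(kids, name):
--     is_unique = False
--     number = None
--     found_kid = None
--     for n, kid_name in kids:
--         if name == kid_name and is_unique:
--             return False, None, None
--         if name == kid_name:
--             is_unique = True
--             found_kid = kid_name
--             number = n
--     if is_unique:
--         return True, number, found_kid
--     else:
--         return False, None, None
-- ===== SOURCE B (Python) =====
-- def found_is_unique_by_name(kids, name):
--     matches = [(n, nm) for n, nm in kids if nm == name]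
--     if len(matches) == 1:
--         number, found_name = matches[0]
--         return True, number, found_name
--     return False, None, None
-- ===== Notes on version B (the rewrite author's own statement) =====
-- stated objective: simpler
-- what changed: Replaces A's stateful single pass with three accumulators and an early return by gathering all matching records in a comprehension and branching on its length.
import Mathlib
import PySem

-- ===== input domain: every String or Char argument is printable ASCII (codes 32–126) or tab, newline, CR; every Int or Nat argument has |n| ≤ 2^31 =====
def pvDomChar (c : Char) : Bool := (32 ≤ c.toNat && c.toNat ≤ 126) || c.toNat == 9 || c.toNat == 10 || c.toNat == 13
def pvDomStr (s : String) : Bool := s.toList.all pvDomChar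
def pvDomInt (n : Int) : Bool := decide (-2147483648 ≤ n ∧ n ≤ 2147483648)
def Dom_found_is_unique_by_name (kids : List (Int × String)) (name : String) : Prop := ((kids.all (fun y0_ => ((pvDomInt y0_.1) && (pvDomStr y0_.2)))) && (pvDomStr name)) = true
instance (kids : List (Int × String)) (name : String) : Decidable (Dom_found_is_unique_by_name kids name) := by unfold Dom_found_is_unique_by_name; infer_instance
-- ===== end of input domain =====

-- B replaces A's stateful single pass (three accumulators, early return) by gathering all matching records and branching on the count; same O(n) cost, simpler decomposition.


-- ===== PORT A =====
-- loop of A: state (is_unique, number, found_kid); early return on a second match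
def fiuGoA (name : String) : List (Int × String) → Bool → Option Int → Option String →
    Bool × Option Int × Option String
  | [], isU, num, fk => if isU then (true, num, fk) else (false, none, none)
  | (n, kn) :: rest, isU, num, fk =>
    if name == kn && isU then (false, none, none)
    else if name == kn then fiuGoA name rest true (some n) (some kn)
    else fiuGoA name rest isU num fk

def found_is_unique_by_name (kids : List (Int × String)) (name : String) : Bool × Option Int × Option String :=
  fiuGoA name kids false none none

-- ===== PORT B =====
def found_is_unique_by_name_alt (kids : List (Int × String)) (name : String) : Bool × Option Int × Option String :=
  let ms := kids.filter (fun p => p.2 == name)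
  match ms with
  | [(n, nm)] => (true, some n, some nm)
  | _ => (false, none, none)

-- ===== PRECONDITION & SPEC =====
def Spec_found_is_unique_by_name (kids : List (Int × String)) (name : String) (out : Bool × Option Int × Option String) : Prop := out = found_is_unique_by_name_alt kids name
instance (kids : List (Int × String)) (name : String) (out : Bool × Option Int × Option String) : Decidable (Spec_found_is_unique_by_name kids name out) := by unfold Spec_found_is_unique_by_name; infer_instance

-- ===== CLAIM (what is proved, stated in full; the proofs are below) =====
def Claim_equal_found_is_unique_by_name : Prop := ∀ (kids : List (Int × String)) (name : String), Dom_found_is_unique_by_name kids name → Spec_found_is_unique_by_name kids name (found_is_unique_by_name kids name)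

-- ===== LEMMAS AND PROOFS =====

-- once a unique match (n, nm) is held, the result is (true, n, nm) iff no further match occurs
theorem fiuGoA_found (name : String) (rest : List (Int × String)) (n : Int) (nm : String) :
    fiuGoA name rest true (some n) (some nm) =
      if rest.filter (fun p => p.2 == name) = [] then (true, some n, some nm)
      else (false, none, none) := by
  induction rest with
  | nil => simp [fiuGoA]
  | cons hd tl ih =>
    obtain ⟨m, kn⟩ := hd
    by_cases h : kn = name
    · have h'' : (name == kn) = true := by simp [h]
      rw [List.filter_cons_of_pos (by simp [h])]
      simp [fiuGoA, h'']
    · have h' : (kn == name) = false := beq_false_of_ne h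
      have h'' : (name == kn) = false := beq_false_of_ne (fun e => h e.symm)
      rw [List.filter_cons_of_neg (by simp [h'])]
      simp only [fiuGoA, h'', Bool.false_and, Bool.false_eq_true, if_false, ih]

-- from the empty state, A's loop computes B's case analysis on the filtered matches
theorem fiuGoA_none (name : String) (kids : List (Int × String)) :
    fiuGoA name kids false none none =
      (match kids.filter (fun p => p.2 == name) with
       | [(n, nm)] => (true, some n, some nm)
       | _ => (false, none, none)) := by
  induction kids with
  | nil => simp [fiuGoA]
  | cons hd tl ih =>
    obtain ⟨m, kn⟩ := hd
    by_cases h : kn = name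
    · have h'' : (name == kn) = true := by simp [h]
      rw [List.filter_cons_of_pos (by simp [h])]
      simp only [fiuGoA, h'', Bool.and_false, Bool.false_eq_true, if_false,
        fiuGoA_found]
      cases hf : tl.filter (fun p => p.2 == name) with
      | nil => simp
      | cons a b => simp
    · have h' : (kn == name) = false := beq_false_of_ne h
      have h'' : (name == kn) = false := beq_false_of_ne (fun e => h e.symm)
      rw [List.filter_cons_of_neg (by simp [h'])]
      simp only [fiuGoA, h'', Bool.false_and, Bool.false_eq_true, if_false, ih]

-- ===== VERDICT (by name: the statement is the Claim_ definition above) =====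
theorem found_is_unique_by_name_spec : Claim_equal_found_is_unique_by_name := by
  intro kids name _
  unfold Spec_found_is_unique_by_name found_is_unique_by_name found_is_unique_by_name_alt
  exact fiuGoA_none name kids
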